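-- pv_equiv track=rewrite | github.com/JoshuaDunnink/advent | source/2015/day_15.py | get_recipe_score
-- ===== SOURCE A (Python) =====
-- def get_recipe_score(scores):
--     transposed_scores = list(map(list, zip(*scores)))
--     summed_scores = []
--     for t_scores in transposed_scores:
--         added = sum(t_scores)
--         if added <= 0:
--             added = 0
--         summed_scores.append(added)
--     total_score = 1
--     for score in summed_scores:
--         total_score = total_score * score
--     return total_score
-- ===== SOURCE B (Python) =====
-- def get_recipe_score(scores):
--     # Recursive: peel the first element of every row, multiply the clamped
--     # head-sum into the result, recurse on the tails; stops when any row runs out.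
--     if not scores or any(not row for row in scores):
--         return 1
--     heads = sum(row[0] for row in scores)
--     return max(0, heads) * get_recipe_score([row[1:] for row in scores])
-- ===== Notes on version B (the rewrite author's own statement) =====
-- stated objective: alternative
-- what changed: Replaces A's three staged passes (transpose, clamp-sum list, product loop) by a single recursion that peels one element off every row, multiplies the clamped head-sum immediately and recurses on the row tails, never building the transposed or summed lists.
import Mathlib
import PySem

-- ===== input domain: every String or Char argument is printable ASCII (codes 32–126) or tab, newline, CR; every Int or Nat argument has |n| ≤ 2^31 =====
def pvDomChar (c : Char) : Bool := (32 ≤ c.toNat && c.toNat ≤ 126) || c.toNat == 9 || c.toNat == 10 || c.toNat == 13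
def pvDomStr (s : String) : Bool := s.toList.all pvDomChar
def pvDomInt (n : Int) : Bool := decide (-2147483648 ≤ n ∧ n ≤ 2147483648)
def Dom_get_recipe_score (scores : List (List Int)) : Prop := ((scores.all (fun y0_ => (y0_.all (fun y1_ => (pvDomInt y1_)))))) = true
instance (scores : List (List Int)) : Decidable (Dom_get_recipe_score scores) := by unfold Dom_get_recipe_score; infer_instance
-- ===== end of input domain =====

-- B replaces A's staged passes (transpose, clamped column-sum list, product loop) by one
-- recursion that peels the head of every row, multiplies the clamped head-sum in as it goes,
-- and recurses on the tails; same cost, genuinely different control structure.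

-- ===== PORT A =====
-- zip(*scores): peel one element off every row while all rows are nonempty
def pyZipStar : List (List Int) → List (List Int)
  | [] => []
  | c :: rest =>
    if c ≠ [] ∧ ∀ r ∈ rest, r ≠ [] then
      (c.headI :: rest.map List.headI) :: pyZipStar (c.tail :: rest.map List.tail)
    else []
termination_by rows => rows.headI.length
decreasing_by
  simp only [List.headI]
  rename_i h; cases c with
  | nil => exact absurd rfl h.1
  | cons a t => simp

def get_recipe_score (scores : List (List Int)) : Int :=
  let transposed_scores := pyZipStar scores
  let summed_scores := transposed_scores.foldl
    (fun acc t_scores =>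
      let added := t_scores.sum
      let added := if added ≤ 0 then 0 else added
      acc ++ [added]) ([] : List Int)
  summed_scores.foldl (fun total_score score => total_score * score) 1

-- ===== PORT B =====
-- Source B's recursion: guard 'not scores or any empty row' → 1; row[0] is headI (rows proven
-- nonempty by the guard), row[1:] is tail (exact on a nonempty list).
def get_recipe_score_alt (scores : List (List Int)) : Int :=
  if scores = [] ∨ ∃ r ∈ scores, r = [] then 1
  else
    (max 0 (scores.map (fun row => row.headI)).sum) *
      get_recipe_score_alt (scores.map (fun row => row.tail))
termination_by (scores.headI.length + scores.length)
decreasing_by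
  rename_i h
  push Not at h
  cases scores with
  | nil => exact absurd rfl h.1
  | cons c rest =>
    have hc : c ≠ [] := h.2 c (List.mem_cons_self)
    cases c with
    | nil => exact absurd rfl hc
    | cons a t => simp

-- ===== PRECONDITION & SPEC =====
def Spec_get_recipe_score (scores : List (List Int)) (out : Int) : Prop := out = get_recipe_score_alt scores
instance (scores : List (List Int)) (out : Int) : Decidable (Spec_get_recipe_score scores out) := by unfold Spec_get_recipe_score; infer_instance

-- ===== CLAIM (what is proved, stated in full; the proofs are below) =====
def Claim_equal_get_recipe_score : Prop := ∀ (scores : List (List Int)), Dom_get_recipe_score scores → Spec_get_recipe_score scores (get_recipe_score scores)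

-- ===== LEMMAS AND PROOFS =====
lemma clamp_eq_max (t : Int) : (if t ≤ 0 then 0 else t) = max 0 t := by
  split_ifs <;> omega

lemma foldl_append_map {α : Type} (f : α → Int) (L : List α) (acc : List Int) :
    L.foldl (fun a t => a ++ [f t]) acc = acc ++ L.map f := by
  induction L generalizing acc with
  | nil => simp
  | cons x L ih => simp [ih]

lemma foldl_mul_eq_prod (L : List Int) :
    L.foldl (fun total_score score => total_score * score) 1 = L.prod := by
  rw [List.prod_eq_foldl]

-- A's result is the product of clamped sums of the transposed rows
lemma A_eq_prod (scores : List (List Int)) :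
    get_recipe_score scores = ((pyZipStar scores).map (fun t => max 0 t.sum)).prod := by
  show List.foldl _ 1 (List.foldl _ [] (pyZipStar scores)) = _
  rw [foldl_append_map (fun t => if List.sum t ≤ 0 then (0:Int) else List.sum t)
      (pyZipStar scores) [], List.nil_append, foldl_mul_eq_prod]
  congr 1
  exact List.map_congr_left (fun t _ => clamp_eq_max t.sum)

-- B's recursion computes the same product, peeling pyZipStar one step at a time
lemma B_eq_prod (scores : List (List Int)) :
    get_recipe_score_alt scores = ((pyZipStar scores).map (fun t => max 0 t.sum)).prod := by
  induction scores using get_recipe_score_alt.induct with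
  | case1 scores h =>
    rw [get_recipe_score_alt, if_pos h]
    rcases h with h | h
    · subst h; rw [pyZipStar]; rfl
    · cases scores with
      | nil => rw [pyZipStar]; rfl
      | cons c rest =>
        rw [pyZipStar, if_neg]
        · rfl
        · rcases h with ⟨r, hr, hre⟩
          rcases List.mem_cons.mp hr with h1 | h2
          · exact fun hx => hx.1 (h1 ▸ hre)
          · exact fun hx => (hx.2 r h2) hre
  | case2 scores h ih =>
    rw [get_recipe_score_alt, if_neg h]
    push Not at h
    cases scores with
    | nil => exact absurd rfl h.1
    | cons c rest =>
      have hc : c ≠ [] := h.2 c (List.mem_cons_self)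
      have hrest : ∀ r ∈ rest, r ≠ [] := fun r hr => h.2 r (List.mem_cons_of_mem _ hr)
      rw [pyZipStar, if_pos ⟨hc, hrest⟩]
      simp only [List.map_cons, List.prod_cons]
      simp only [List.map_attach_eq_pmap, List.pmap_eq_map, List.map_cons] at ih
      show max 0 (c.headI :: rest.map List.headI).sum * get_recipe_score_alt (c.tail :: rest.map List.tail) = _
      rw [ih]

-- ===== VERDICT (by name: the statement is the Claim_ definition above) =====
theorem get_recipe_score_spec : Claim_equal_get_recipe_score := by
  intro scores _
  unfold Spec_get_recipe_score
  rw [A_eq_prod, B_eq_prod]
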